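-- pv_equiv track=rewrite | github.com/JarcauCristian/MageAPI | utils/linter.py | __remove_dangling_ifs
-- ===== SOURCE A (Python) =====
-- def __remove_dangling_ifs(code: str) -> str:
--     lines = code.split('\n')
--     clean_lines = []
--     skip_next = False
--
--     for i, line in enumerate(lines):
--         if skip_next:
--             skip_next = False
--             continue
--
--         stripped_line = line.strip()
--         if stripped_line.startswith('if ') and stripped_line.endswith(':'):
--             if i + 1 >= len(lines) or lines[i + 1].strip() == '':
--                 skip_next = True
--                 continue
--
--         clean_lines.append(line)
--
--     return '\n'.join(clean_lines)
-- ===== SOURCE B (Python) =====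
-- def __remove_dangling_ifs(code: str) -> str:
--     lines = code.split('\n')
--     remove = set()
--     for i, line in enumerate(lines):
--         s = line.strip()
--         if s.startswith('if ') and s.endswith(':') and (i + 1 >= len(lines) or lines[i + 1].strip() == ''):
--             remove.add(i)
--             if i + 1 < len(lines):
--                 remove.add(i + 1)
--     return '\n'.join(line for i, line in enumerate(lines) if i not in remove)
-- ===== Notes on version B (the rewrite author's own statement) =====
-- stated objective: alternative
-- what changed: Replaces A's one-pass skip_next flag state machine with a two-pass approach: first collect the indices of dangling ifs and their blank successors into a set, then emit every line whose index is not in the set.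
import Mathlib
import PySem

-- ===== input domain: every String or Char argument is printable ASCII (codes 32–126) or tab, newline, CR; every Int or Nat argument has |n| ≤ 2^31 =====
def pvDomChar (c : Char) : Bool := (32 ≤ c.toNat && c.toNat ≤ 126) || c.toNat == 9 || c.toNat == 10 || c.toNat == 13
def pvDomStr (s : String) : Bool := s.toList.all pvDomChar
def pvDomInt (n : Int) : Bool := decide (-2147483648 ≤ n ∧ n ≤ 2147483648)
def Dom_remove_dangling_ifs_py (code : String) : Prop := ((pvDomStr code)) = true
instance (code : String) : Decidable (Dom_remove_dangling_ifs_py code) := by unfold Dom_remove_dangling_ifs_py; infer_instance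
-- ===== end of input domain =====

-- B replaces A's skip_next flag state machine with two passes — mark removal indices in a set, then filter — same output (objective: alternative decomposition).

-- ===== PORT A =====
-- the body of A's for-loop: state = (clean_lines, skip_next)
def pvAStep (lines : List String) (st : List String × Bool) (p : Int × String) : List String × Bool :=
  if st.2 then (st.1, false)
  else
    if PySem.Str.startswith (PySem.Str.strip p.2) "if " &&
        PySem.Str.endswith (PySem.Str.strip p.2) ":" then
      if decide ((lines.length : Int) ≤ p.1 + 1) ||
          (PySem.Str.strip (PySem.List.pyGetD lines (p.1 + 1) "") == "") then
        (st.1, true)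
      else (st.1 ++ [p.2], false)
    else (st.1 ++ [p.2], false)

def remove_dangling_ifs_py (code : String) : String :=
  let lines := (PySem.Str.split? code "\n").getD []   -- sep "\n" ≠ "", so split? is some
  let r := (PySem.List.enumerate lines 0).foldl (pvAStep lines) ([], false)
  PySem.Str.join "\n" r.1

-- ===== PORT B =====
-- the dangling-if test B spells in one conjunction on an (index, line) pair
def pvCond (lines : List String) (p : Int × String) : Bool :=
  PySem.Str.startswith (PySem.Str.strip p.2) "if " &&
    PySem.Str.endswith (PySem.Str.strip p.2) ":" &&
    (decide ((lines.length : Int) ≤ p.1 + 1) ||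
      (PySem.Str.strip (PySem.List.pyGetD lines (p.1 + 1) "") == ""))

-- pass 1 body: mark the indices to remove
def pvBMark (lines : List String) (r : PySem.Set Int) (p : Int × String) : PySem.Set Int :=
  if pvCond lines p then
    if p.1 + 1 < (lines.length : Int) then
      PySem.Set.add (PySem.Set.add r p.1) (p.1 + 1)
    else PySem.Set.add r p.1
  else r

def remove_dangling_ifs_py_alt (code : String) : String :=
  let lines := (PySem.Str.split? code "\n").getD []
  let remove := (PySem.List.enumerate lines 0).foldl (pvBMark lines) PySem.Set.empty
  PySem.Str.join "\n"
    (((PySem.List.enumerate lines 0).filter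
        (fun p => !(PySem.Set.contains remove p.1))).map (·.2))

-- ===== PRECONDITION & SPEC =====
def Spec_remove_dangling_ifs_py (code : String) (out : String) : Prop := out = remove_dangling_ifs_py_alt code
instance (code : String) (out : String) : Decidable (Spec_remove_dangling_ifs_py code out) := by unfold Spec_remove_dangling_ifs_py; infer_instance

-- ===== CLAIM (what is proved, stated in full; the proofs are below) =====
def Claim_equal_remove_dangling_ifs_py : Prop := ∀ (code : String), Dom_remove_dangling_ifs_py code → Spec_remove_dangling_ifs_py code (remove_dangling_ifs_py code)

-- ===== LEMMAS AND PROOFS =====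

-- proof-side view of the dangling test at a Nat index
def pvDang (lines : List String) (k : Nat) : Bool :=
  pvCond lines ((k : Int), lines.getD k "")

-- common specification of the kept lines: skip a dangling if and its (blank) successor
def pvKeep (lines : List String) (k : Nat) : List String :=
  if h : k < lines.length then
    if pvDang lines k then pvKeep lines (k + 2) else lines[k] :: pvKeep lines (k + 1)
  else []
termination_by lines.length - k

lemma pvCond_at (lines : List String) (k : Nat) (hk : k < lines.length) :
    pvCond lines ((k : Int), lines[k]) = pvDang lines k := by
  simp [pvDang, List.getD_eq_getElem?_getD, hk]

lemma pvCond_false_of_blank (lines : List String) (p : Int × String)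
    (h : PySem.Str.strip p.2 = "") : pvCond lines p = false := by
  apply Bool.eq_false_iff.mpr
  intro hc
  simp only [pvCond, Bool.and_eq_true] at hc
  have h1 := hc.1.1
  rw [h] at h1
  exact absurd h1 (by decide)

-- a dangling if's successor line is blank (or absent), hence never itself dangling
lemma pvDang_succ (lines : List String) (k : Nat) (h : pvDang lines k = true) :
    pvDang lines (k + 1) = false := by
  apply pvCond_false_of_blank
  simp only [pvDang, pvCond, Bool.and_eq_true, Bool.or_eq_true, decide_eq_true_eq,
    beq_iff_eq] at h
  obtain ⟨h1, h3⟩ := h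
  rcases h3 with h3 | h3
  · -- k+1 is out of range: the default line "" strips to ""
    have hout : lines.getD (k + 1) "" = "" := List.getD_eq_default _ _ (by omega)
    show PySem.Str.strip (lines.getD (k + 1) "") = ""
    rw [hout]; decide
  · -- lines[k+1] strips to ""
    have hpg : PySem.List.pyGetD lines ((k : Int) + 1) "" = lines.getD (k + 1) "" := by
      have hc : (k : Int) + 1 = ((k + 1 : Nat) : Int) := by push_cast; ring
      rw [hc, PySem.List.pyGetD_natCast]
    show PySem.Str.strip (lines.getD (k + 1) "") = ""
    rw [← hpg]; exact h3

lemma pvAStep_false (lines : List String) (acc : List String) (p : Int × String) :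
    pvAStep lines (acc, false) p =
      if pvCond lines p then (acc, true) else (acc ++ [p.2], false) := by
  simp only [pvAStep, pvCond, Bool.and_assoc]
  cases h1 : PySem.Str.startswith (PySem.Str.strip p.2) "if " <;>
    cases h2 : PySem.Str.endswith (PySem.Str.strip p.2) ":" <;>
      cases h3 : (decide ((lines.length : Int) ≤ p.1 + 1) ||
          (PySem.Str.strip (PySem.List.pyGetD lines (p.1 + 1) "") == "")) <;>
        simp [h1, h2, h3]

lemma pvDrop_cons (lines : List String) (k : Nat) (hk : k < lines.length) :
    lines.drop k = lines[k] :: lines.drop (k + 1) :=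
  List.drop_eq_getElem_cons hk

-- A's loop, started at index k with skip_next = False, appends exactly pvKeep lines k
lemma pvFoldA (lines : List String) :
    ∀ n k acc, lines.length - k = n →
      ((PySem.List.enumerate (lines.drop k) (k : Int)).foldl (pvAStep lines) (acc, false)).1
        = acc ++ pvKeep lines k := by
  intro n
  induction n using Nat.strong_induction_on with
  | _ n ih =>
    intro k acc hn
    by_cases hk : k < lines.length
    · rw [pvDrop_cons lines k hk, PySem.List.enumerate_cons, List.foldl_cons,
        pvAStep_false, pvCond_at lines k hk]
      by_cases hd : pvDang lines k = true
      · rw [if_pos hd]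
        rw [pvKeep, dif_pos hk, if_pos hd]
        by_cases hk1 : k + 1 < lines.length
        · rw [pvDrop_cons lines (k + 1) hk1, PySem.List.enumerate_cons, List.foldl_cons]
          have hskip : pvAStep lines (acc, true) (((k : Int)) + 1, lines[k + 1]) = (acc, false) := by
            simp [pvAStep]
          rw [hskip]
          have h2 : ((k : Int)) + 1 + 1 = (((k + 2 : Nat)) : Int) := by push_cast; ring
          rw [h2, ih (lines.length - (k + 2)) (by omega) (k + 2) acc rfl]
        · have hnil : lines.drop (k + 1) = [] := List.drop_eq_nil_of_le (by omega)
          rw [hnil, PySem.List.enumerate_nil, List.foldl_nil]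
          rw [pvKeep, dif_neg (by omega)]
          simp
      · rw [if_neg hd]
        rw [pvKeep, dif_pos hk, if_neg hd]
        have h1 : ((k : Int)) + 1 = (((k + 1 : Nat)) : Int) := by push_cast; ring
        rw [h1, ih (lines.length - (k + 1)) (by omega) (k + 1) (acc ++ [lines[k]]) rfl]
        simp
    · have hnil : lines.drop k = [] := List.drop_eq_nil_of_le (by omega)
      rw [hnil, PySem.List.enumerate_nil, List.foldl_nil]
      rw [pvKeep, dif_neg hk]
      simp

-- membership in B's marking fold
lemma pvMemB (lines : List String) :
    ∀ (l : List (Int × String)) (s : PySem.Set Int) (x : Int),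
      x ∈ l.foldl (pvBMark lines) s ↔
        x ∈ s ∨ ∃ p ∈ l, pvCond lines p = true ∧
          (x = p.1 ∨ (x = p.1 + 1 ∧ p.1 + 1 < (lines.length : Int))) := by
  intro l
  induction l with
  | nil => simp
  | cons p l ih =>
    intro s x
    rw [List.foldl_cons, ih]
    constructor
    · rintro (hs | ⟨q, hq, hcq, hxq⟩)
      · simp only [pvBMark] at hs
        by_cases hc : pvCond lines p = true
        · rw [if_pos hc] at hs
          by_cases h1 : p.1 + 1 < (lines.length : Int)
          · rw [if_pos h1] at hs
            rw [PySem.Set.mem_add] at hs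
            rcases hs with hs | hs
            · rw [PySem.Set.mem_add] at hs
              rcases hs with hs | hs
              · exact Or.inl hs
              · exact Or.inr ⟨p, by simp, hc, Or.inl hs⟩
            · exact Or.inr ⟨p, by simp, hc, Or.inr ⟨hs, h1⟩⟩
          · rw [if_neg h1, PySem.Set.mem_add] at hs
            rcases hs with hs | hs
            · exact Or.inl hs
            · exact Or.inr ⟨p, by simp, hc, Or.inl hs⟩
        · rw [if_neg hc] at hs
          exact Or.inl hs
      · exact Or.inr ⟨q, List.mem_cons_of_mem _ hq, hcq, hxq⟩
    · have hmem : x ∈ s → x ∈ pvBMark lines s p := by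
        intro hs
        simp only [pvBMark]
        split
        · split
          · rw [PySem.Set.mem_add, PySem.Set.mem_add]; exact Or.inl (Or.inl hs)
          · rw [PySem.Set.mem_add]; exact Or.inl hs
        · exact hs
      rintro (hs | ⟨q, hq, hcq, hxq⟩)
      · exact Or.inl (hmem hs)
      · rcases List.mem_cons.mp hq with rfl | hq
        · refine Or.inl ?_
          simp only [pvBMark, if_pos hcq]
          rcases hxq with rfl | ⟨rfl, h1⟩
          · split
            · rw [PySem.Set.mem_add, PySem.Set.mem_add]; exact Or.inl (Or.inr rfl)
            · rw [PySem.Set.mem_add]; exact Or.inr rfl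
          · rw [if_pos h1, PySem.Set.mem_add]; exact Or.inr rfl
        · exact Or.inr ⟨q, hq, hcq, hxq⟩

-- the removal set holds exactly: dangling lines, and successors of dangling lines
lemma pvRemChar (lines : List String) (k : Nat) (hk : k < lines.length) :
    ((k : Int) ∈ (PySem.List.enumerate lines 0).foldl (pvBMark lines) PySem.Set.empty) ↔
      (pvDang lines k = true ∨ (0 < k ∧ pvDang lines (k - 1) = true)) := by
  rw [pvMemB]
  simp only [PySem.Set.empty, List.not_mem_nil, false_or]
  constructor
  · rintro ⟨p, hp, hc, hx⟩
    rw [PySem.List.mem_enumerate_iff] at hp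
    obtain ⟨j, hj, rfl⟩ := hp
    simp only [zero_add] at hc hx
    rw [pvCond_at lines j hj] at hc
    rcases hx with hx | ⟨hx, _⟩
    · have : k = j := by exact_mod_cast hx
      subst this; exact Or.inl hc
    · have : k = j + 1 := by exact_mod_cast hx
      subst this
      exact Or.inr ⟨by omega, by simpa using hc⟩
  · rintro (hd | ⟨hk0, hd⟩)
    · refine ⟨((k : Int), lines[k]), ?_, ?_, Or.inl rfl⟩
      · rw [PySem.List.mem_enumerate_iff]
        exact ⟨k, hk, by simp⟩
      · rw [pvCond_at lines k hk]; exact hd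
    · refine ⟨(((k - 1 : Nat) : Int), lines[k - 1]), ?_, ?_,
        Or.inr ⟨by push_cast; omega, by push_cast; omega⟩⟩
      · rw [PySem.List.mem_enumerate_iff]
        exact ⟨k - 1, by omega, by simp⟩
      · rw [pvCond_at lines (k - 1) (by omega)]; exact hd

-- B's filtering pass, started at k with no dangling if just before, yields pvKeep lines k
lemma pvFiltB (lines : List String) :
    ∀ n k, lines.length - k = n →
      (k = 0 ∨ pvDang lines (k - 1) = false) →
      ((PySem.List.enumerate (lines.drop k) (k : Int)).filter
          (fun p => !(PySem.Set.contains
            ((PySem.List.enumerate lines 0).foldl (pvBMark lines) PySem.Set.empty) p.1))).map (·.2)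
        = pvKeep lines k := by
  intro n
  induction n using Nat.strong_induction_on with
  | _ n ih =>
    intro k hn hprev
    by_cases hk : k < lines.length
    · rw [pvDrop_cons lines k hk, PySem.List.enumerate_cons, List.filter_cons]
      have hRk : ((k : Int) ∈ (PySem.List.enumerate lines 0).foldl (pvBMark lines) PySem.Set.empty)
          ↔ pvDang lines k = true := by
        rw [pvRemChar lines k hk]
        constructor
        · rintro (h | ⟨h0, h1⟩)
          · exact h
          · rcases hprev with rfl | hprev
            · omega
            · rw [hprev] at h1; exact absurd h1 (by simp)
        · exact Or.inl
      by_cases hd : pvDang lines k = true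
      · have hc : PySem.Set.contains
            ((PySem.List.enumerate lines 0).foldl (pvBMark lines) PySem.Set.empty) (k : Int) = true :=
          (PySem.Set.contains_iff _ _).mpr (hRk.mpr hd)
        simp only [hc, Bool.not_true, Bool.false_eq_true, if_false]
        rw [pvKeep, dif_pos hk, if_pos hd]
        by_cases hk1 : k + 1 < lines.length
        · rw [pvDrop_cons lines (k + 1) hk1, PySem.List.enumerate_cons, List.filter_cons]
          have hR1 : (((k : Int)) + 1 ∈ (PySem.List.enumerate lines 0).foldl (pvBMark lines) PySem.Set.empty) := by
            have hcast : ((k : Int)) + 1 = (((k + 1 : Nat)) : Int) := by push_cast; ring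
            rw [hcast, pvRemChar lines (k + 1) hk1]
            exact Or.inr ⟨by omega, by simpa using hd⟩
          have hc1 : PySem.Set.contains
              ((PySem.List.enumerate lines 0).foldl (pvBMark lines) PySem.Set.empty) ((k : Int) + 1) = true :=
            (PySem.Set.contains_iff _ _).mpr hR1
          simp only [hc1, Bool.not_true, Bool.false_eq_true, if_false]
          have hcast : ((k : Int)) + 1 + 1 = (((k + 2 : Nat)) : Int) := by push_cast; ring
          rw [hcast, ih (lines.length - (k + 2)) (by omega) (k + 2) rfl
            (Or.inr (by simpa using pvDang_succ lines k hd))]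
        · have hnil : lines.drop (k + 1) = [] := List.drop_eq_nil_of_le (by omega)
          rw [hnil, PySem.List.enumerate_nil]
          rw [pvKeep, dif_neg (by omega)]
          simp
      · have hc : PySem.Set.contains
            ((PySem.List.enumerate lines 0).foldl (pvBMark lines) PySem.Set.empty) (k : Int) = false := by
          rw [← Bool.not_eq_true, ← ne_eq]
          intro h
          exact hd (hRk.mp ((PySem.Set.contains_iff _ _).mp h))
        simp only [hc, Bool.not_false, if_true, List.map_cons]
        rw [pvKeep, dif_pos hk, if_neg hd]
        have hcast : ((k : Int)) + 1 = (((k + 1 : Nat)) : Int) := by push_cast; ring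
        rw [hcast, ih (lines.length - (k + 1)) (by omega) (k + 1) rfl
          (Or.inr (by simpa using (Bool.not_eq_true _).mp hd))]
    · have hnil : lines.drop k = [] := List.drop_eq_nil_of_le (by omega)
      rw [hnil, PySem.List.enumerate_nil]
      rw [pvKeep, dif_neg hk]
      simp

-- ===== VERDICT (by name: the statement is the Claim_ definition above) =====
theorem remove_dangling_ifs_py_spec : Claim_equal_remove_dangling_ifs_py := by
  intro code _
  show remove_dangling_ifs_py code = remove_dangling_ifs_py_alt code
  have key : ∀ lines : List String,
      PySem.Str.join "\n" ((PySem.List.enumerate lines 0).foldl (pvAStep lines) ([], false)).1 =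
      PySem.Str.join "\n" (((PySem.List.enumerate lines 0).filter
        (fun p => !(PySem.Set.contains
          ((PySem.List.enumerate lines 0).foldl (pvBMark lines) PySem.Set.empty) p.1))).map (·.2)) := by
    intro lines
    have hA := pvFoldA lines (lines.length - 0) 0 [] rfl
    have hB := pvFiltB lines (lines.length - 0) 0 rfl (Or.inl rfl)
    simp only [List.drop_zero, Nat.cast_zero] at hA hB
    rw [hA, hB, List.nil_append]
  exact key ((PySem.Str.split? code "\n").getD [])
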